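-- pv_equiv track=rewrite | github.com/manigondasrujana/Python | Data_Wrangling_Assignment.py | uscounter
-- ===== SOURCE A (Python) =====
-- def uscounter(string):
--     uslen = 0
--     for x in string:
--         if x == '_':
--             uslen += 1
--         else:
--             break
--     return uslen
-- ===== SOURCE B (Python) =====
-- def uscounter(string):
--     return len(string) - len(string.lstrip('_'))
-- ===== Notes on version B (the rewrite author's own statement) =====
-- stated objective: idiomatic
-- what changed: Replaces the character-by-character counting loop with the length-difference idiom len(s) - len(s.lstrip('_')) (no explicit loop or branch).
import Mathlib
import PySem

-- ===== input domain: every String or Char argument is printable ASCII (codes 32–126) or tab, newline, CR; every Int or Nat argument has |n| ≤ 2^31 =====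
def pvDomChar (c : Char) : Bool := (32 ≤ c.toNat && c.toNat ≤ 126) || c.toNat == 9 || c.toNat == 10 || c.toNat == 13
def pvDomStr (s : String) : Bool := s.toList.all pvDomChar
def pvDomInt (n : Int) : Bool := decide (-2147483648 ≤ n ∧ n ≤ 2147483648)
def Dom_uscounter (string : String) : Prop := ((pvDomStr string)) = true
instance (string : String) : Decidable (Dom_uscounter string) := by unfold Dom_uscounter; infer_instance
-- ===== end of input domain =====

-- B replaces A's explicit counting loop with the idiomatic length-difference form
-- len(s) - len(s.lstrip('_')); equivalence of the two is proved below.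

-- ===== PORT A =====
-- the for-loop with break: count leading '_' one character at a time, stop at the first other character
def uscounterGo : List Char → Int → Int
  | [], acc => acc
  | c :: rest, acc => if c = '_' then uscounterGo rest (acc + 1) else acc

def uscounter (string : String) : Int := uscounterGo string.toList 0

-- ===== PORT B =====
-- string.lstrip('_') ported by hand as dropWhile (· == '_'): exact, since lstrip('_')
-- removes exactly the maximal leading run of '_' characters.
def uscounter_alt (string : String) : Int :=
  (string.toList.length : Int) - ((string.toList.dropWhile (· == '_')).length : Int)

-- ===== PRECONDITION & SPEC =====
def Spec_uscounter (string : String) (out : Int) : Prop := out = uscounter_alt string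
instance (string : String) (out : Int) : Decidable (Spec_uscounter string out) := by unfold Spec_uscounter; infer_instance

-- ===== CLAIM (what is proved, stated in full; the proofs are below) =====
def Claim_equal_uscounter : Prop := ∀ (string : String), Dom_uscounter string → Spec_uscounter string (uscounter string)

-- ===== LEMMAS AND PROOFS =====
theorem uscounterGo_eq (l : List Char) (acc : Int) :
    uscounterGo l acc = acc + ((l.length : Int) - ((l.dropWhile (· == '_')).length : Int)) := by
  induction l generalizing acc with
  | nil => simp [uscounterGo]
  | cons c rest ih =>
    by_cases h : c = '_'
    · simp [uscounterGo, h, List.dropWhile, ih]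
      have hle := List.length_dropWhile_le (p := fun x => x == '_') (l := rest)
      omega
    · simp [uscounterGo, h]

-- ===== VERDICT (by name: the statement is the Claim_ definition above) =====
theorem uscounter_spec : Claim_equal_uscounter := by
  intro s _
  unfold Spec_uscounter uscounter uscounter_alt
  rw [uscounterGo_eq]
  ring
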